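-- pv_equiv track=rewrite | github.com/vtsyvina/signature-sj | python/sequence last version/functions.py | build_segments_dict
-- ===== SOURCE A (Python) =====
-- def build_segments_dict(sequences, step, piece_lenght):
--     result = {}
--     for (name, seq) in sequences.items():
--         segment = seq[step*piece_lenght:(step+1)*piece_lenght];
--         if segment not in result:
--             result[segment] = {}
--         result[segment][name] =  seq
--     return result
-- ===== SOURCE B (Python) =====
-- def build_segments_dict(sequences, step, piece_lenght):
--     key = lambda s: s[step*piece_lenght:(step+1)*piece_lenght]
--     segs = []
--     for seq in sequences.values():
--         k = key(seq)
--         if k not in segs: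
--             segs.append(k)
--     return {g: {name: seq for name, seq in sequences.items() if key(seq) == g}
--             for g in segs}
-- ===== Notes on version B (the rewrite author's own statement) =====
-- stated objective: alternative
-- what changed: Replaces A's single pass that builds nested dicts incrementally with a two-phase pass: first collect the distinct segment keys in first-occurrence order, then build each group by filtering the sequences by that key.
import Mathlib
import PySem

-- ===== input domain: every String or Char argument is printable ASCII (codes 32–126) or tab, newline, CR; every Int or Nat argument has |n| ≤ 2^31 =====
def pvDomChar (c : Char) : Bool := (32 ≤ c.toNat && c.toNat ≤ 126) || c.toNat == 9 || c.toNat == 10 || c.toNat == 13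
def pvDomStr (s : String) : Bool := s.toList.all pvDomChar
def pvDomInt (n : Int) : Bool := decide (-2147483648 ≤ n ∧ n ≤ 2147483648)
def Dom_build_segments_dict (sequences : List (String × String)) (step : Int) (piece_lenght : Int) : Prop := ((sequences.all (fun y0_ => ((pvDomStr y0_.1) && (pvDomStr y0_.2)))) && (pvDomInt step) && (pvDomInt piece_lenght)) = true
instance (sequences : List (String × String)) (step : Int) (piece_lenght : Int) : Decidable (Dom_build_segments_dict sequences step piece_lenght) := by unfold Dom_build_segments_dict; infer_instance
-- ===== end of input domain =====

-- B groups by distinct segments then filters per segment, instead of A's one-pass nested-dict build; objective: alternative (same observable result, different decomposition).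

-- ===== PORT A =====
-- Python inner-dict assignment d[name] = seq: overwrite first match in place, else append (exact dict-assignment semantics)
def dinsertS (d : List (String × String)) (name seq : String) : List (String × String) :=
  match d with
  | [] => [(name, seq)]
  | (k', v') :: rest => if k' = name then (name, seq) :: rest else (k', v') :: dinsertS rest name seq

-- Python result[segment][name] = seq when segment is a key of result: update the (unique first) entry at segment in place (exact)
def dmodify (d : List (String × List (String × String))) (segment name seq : String) :
    List (String × List (String × String)) :=
  match d with
  | [] => []
  | (k', v') :: rest =>
      if k' = segment then (segment, dinsertS v' name seq) :: rest
      else (k', v') :: dmodify rest segment name seq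

def build_segments_dict (sequences : List (String × String)) (step : Int) (piece_lenght : Int) :
    List (String × List (String × String)) :=
  sequences.foldl (fun result p =>
    let segment := PySem.Str.slice p.2 (some (step * piece_lenght)) (some ((step + 1) * piece_lenght))
    -- if segment not in result: result[segment] = {}
    let result := if segment ∈ result.map Prod.fst then result else result ++ [(segment, [])]
    -- result[segment][name] = seq
    dmodify result segment p.1 p.2) []

-- ===== PORT B =====
def build_segments_dict_alt (sequences : List (String × String)) (step : Int) (piece_lenght : Int) :
    List (String × List (String × String)) :=
  let key := fun s => PySem.Str.slice s (some (step * piece_lenght)) (some ((step + 1) * piece_lenght))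
  let segs := sequences.foldl (fun segs p => if key p.2 ∈ segs then segs else segs ++ [key p.2]) []
  segs.map (fun g => (g, sequences.filter (fun p => key p.2 == g)))

-- ===== PRECONDITION & SPEC =====
-- Pre_ excludes lists with duplicate sequence names: the Python argument is a dict, whose keys are necessarily distinct, so such lists do not correspond to any Python input.
def Pre_build_segments_dict (sequences : List (String × String)) (step : Int) (piece_lenght : Int) : Prop :=
  (sequences.map Prod.fst).Nodup
instance (sequences : List (String × String)) (step : Int) (piece_lenght : Int) : Decidable (Pre_build_segments_dict sequences step piece_lenght) := by unfold Pre_build_segments_dict; infer_instance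

def pvWitness_build_segments_dict : (List (String × String)) × Int × Int :=
  ([("a", "xyxy"), ("b", "xzzz"), ("c", "yyxy")], 0, 2)

def Spec_build_segments_dict (sequences : List (String × String)) (step : Int) (piece_lenght : Int) (out : List (String × List (String × String))) : Prop := out = build_segments_dict_alt sequences step piece_lenght
instance (sequences : List (String × String)) (step : Int) (piece_lenght : Int) (out : List (String × List (String × String))) : Decidable (Spec_build_segments_dict sequences step piece_lenght out) := by unfold Spec_build_segments_dict; infer_instance

-- ===== CLAIM (what is proved, stated in full; the proofs are below) =====
def Claim_equal_build_segments_dict : Prop := ∀ (sequences : List (String × String)) (step : Int) (piece_lenght : Int), Dom_build_segments_dict sequences step piece_lenght → Pre_build_segments_dict sequences step piece_lenght → Spec_build_segments_dict sequences step piece_lenght (build_segments_dict sequences step piece_lenght)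

-- ===== LEMMAS AND PROOFS =====

-- keys of a name-fresh dinsertS: it appends
lemma dinsertS_not_mem (d : List (String × String)) (name seq : String)
    (h : name ∉ d.map Prod.fst) : dinsertS d name seq = d ++ [(name, seq)] := by
  induction d with
  | nil => rfl
  | cons p rest ih =>
      simp only [List.map_cons, List.mem_cons] at h
      push_neg at h
      simp [dinsertS, h.1.symm, ih h.2]

-- dmodify past a prefix without the key
lemma dmodify_append_not_mem (d : List (String × List (String × String)))
    (segment name seq : String) (t : List (String × List (String × String)))
    (h : segment ∉ d.map Prod.fst) :
    dmodify (d ++ t) segment name seq = d ++ dmodify t segment name seq := by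
  induction d with
  | nil => rfl
  | cons p rest ih =>
      simp only [List.map_cons, List.mem_cons] at h
      push_neg at h
      simp [dmodify, h.1.symm, ih h.2]

-- dmodify over a map-by-distinct-keys list
lemma dmodify_map (L : List String) (f : String → List (String × String))
    (segment name seq : String) (hnd : L.Nodup) :
    dmodify (L.map (fun g => (g, f g))) segment name seq
      = L.map (fun g => (g, if g = segment then dinsertS (f g) name seq else f g)) := by
  induction L with
  | nil => rfl
  | cons g L' ih =>
      rcases List.nodup_cons.mp hnd with ⟨hg, hnd'⟩
      by_cases hgs : g = segment
      · subst hgs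
        have h1 : ∀ x ∈ L', (fun g1 => (g1, if g1 = g then dinsertS (f g1) name seq else f g1)) x
            = (fun g1 => (g1, f g1)) x := by
          intro x hx
          have : x ≠ g := fun e => hg (e ▸ hx)
          simp [this]
        simp [dmodify, List.map_congr_left h1]
      · simp [List.map_cons, dmodify, hgs, ih hnd']

-- the segment fold: generic facts
def segsFold (f : String → String) (xs : List (String × String)) : List String :=
  xs.foldl (fun segs p => if f p.2 ∈ segs then segs else segs ++ [f p.2]) []

lemma segsFold_append (f : String → String) (xs : List (String × String)) (p : String × String) :
    segsFold f (xs ++ [p])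
      = if f p.2 ∈ segsFold f xs then segsFold f xs else segsFold f xs ++ [f p.2] := by
  simp [segsFold, List.foldl_append]

lemma segsFold_complete (f : String → String) (xs : List (String × String)) :
    ∀ q ∈ xs, f q.2 ∈ segsFold f xs := by
  induction xs using List.reverseRecOn with
  | nil => simp
  | append_singleton xs p ih =>
      intro q hq
      rw [segsFold_append]
      rcases List.mem_append.mp hq with h | h
      · split_ifs with hm
        · exact ih q h
        · exact List.mem_append_left _ (ih q h)
      · simp only [List.mem_singleton] at h
        subst h
        split_ifs with hm
        · exact hm
        · simp

lemma segsFold_nodup (f : String → String) (xs : List (String × String)) :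
    (segsFold f xs).Nodup := by
  induction xs using List.reverseRecOn with
  | nil => simp [segsFold]
  | append_singleton xs p ih =>
      rw [segsFold_append]
      split_ifs with hm
      · exact ih
      · simpa [List.nodup_append] using ⟨ih, fun a ha e => hm (e ▸ ha)⟩

-- main invariant: A's fold equals B's group-by-filter, for any key function, given distinct names
lemma main_inv (f : String → String) (xs : List (String × String))
    (hn : (xs.map Prod.fst).Nodup) :
    xs.foldl (fun result p =>
        let segment := f p.2
        let result := if segment ∈ result.map Prod.fst then result else result ++ [(segment, [])]
        dmodify result segment p.1 p.2) []
      = (segsFold f xs).map (fun g => (g, xs.filter (fun p => f p.2 == g))) := by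
  induction xs using List.reverseRecOn with
  | nil => rfl
  | append_singleton xs p ih =>
      have hn' : (xs.map Prod.fst).Nodup := by
        rw [List.map_append] at hn
        exact (List.nodup_append.mp hn).1
      have hfresh : p.1 ∉ xs.map Prod.fst := by
        rw [List.map_append] at hn
        rw [List.map_singleton] at hn
        intro hmem
        exact (List.nodup_append.mp hn).2.2 p.1 hmem p.1 (by simp) rfl
      rw [List.foldl_append, List.foldl_cons, List.foldl_nil, ih hn', segsFold_append]
      have hkeys : ((segsFold f xs).map (fun g => (g, xs.filter (fun p => f p.2 == g)))).map Prod.fst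
          = segsFold f xs := by simp [Function.comp_def]
      by_cases hm : f p.2 ∈ segsFold f xs
      · -- segment already a key: in-place modify = append p to its group
        simp only [hkeys, if_pos hm]
        rw [dmodify_map _ _ _ _ _ (segsFold_nodup f xs)]
        refine List.map_congr_left ?_
        intro g hg
        by_cases hgs : g = f p.2
        · subst hgs
          have hnotin : p.1 ∉ (xs.filter (fun q => f q.2 == f p.2)).map Prod.fst := by
            intro hmem
            rcases List.mem_map.mp hmem with ⟨q, hq, hq1⟩
            exact hfresh (List.mem_map.mpr ⟨q, List.mem_of_mem_filter hq, hq1⟩)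
          simp [dinsertS_not_mem _ _ _ hnotin, List.filter_append]
        · have : (f p.2 == g) = false := by simp [Ne.symm hgs]
          simp [hgs, List.filter_append, this]
      · -- new segment: append (segment, {}) then fill it with p
        simp only [hkeys, if_neg hm]
        have hnotin2 : f p.2 ∉ ((segsFold f xs).map (fun g => (g, xs.filter (fun p => f p.2 == g)))).map Prod.fst := by
          rw [hkeys]; exact hm
        rw [dmodify_append_not_mem _ _ _ _ _ hnotin2]
        simp only [dmodify, dinsertS]
        rw [List.map_append]
        congr 1
        · refine List.map_congr_left ?_
          intro g hg
          have hgs : (f p.2 == g) = false := by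
            simp only [beq_eq_false_iff_ne, ne_eq]
            intro e; exact hm (e ▸ hg)
          simp [List.filter_append, hgs]
        · have hnil : xs.filter (fun q => f q.2 == f p.2) = [] := by
            rw [List.filter_eq_nil_iff]
            intro q hq hfq
            exact hm ((beq_iff_eq.mp hfq) ▸ segsFold_complete f xs q hq)
          simp [List.filter_append, hnil]

-- ===== VERDICT (by name: the statement is the Claim_ definition above) =====
theorem build_segments_dict_spec : Claim_equal_build_segments_dict := by
  intro sequences step piece_lenght _hdom hpre
  unfold Spec_build_segments_dict build_segments_dict build_segments_dict_alt
  exact main_inv (fun s => PySem.Str.slice s (some (step * piece_lenght)) (some ((step + 1) * piece_lenght)))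
    sequences hpre
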